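-- pv_equiv track=rewrite | github.com/shresth-sahai/Prepfortech | B13/Subhendu/HashMap/tiger-zinda-hai.py | solution
-- ===== SOURCE A (Python) =====
-- def solution(arr):
--     open_tab = set()
--     for i in arr:
--         if i == "END":
--             open_tab.clear()
--         elif i in open_tab:
--             open_tab.remove(i)
--         else:
--             open_tab.add(i)
--     return len(open_tab)
-- ===== SOURCE B (Python) =====
-- def solution(arr):
--     # collect the elements after the last reset, then count keys with odd frequency
--     tail = []
--     for x in arr:
--         if x == "END":
--             tail = []
--         else:
--             tail.append(x)
--     counts = {}
--     for x in tail: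
--         counts[x] = counts.get(x, 0) + 1
--     return sum(1 for c in counts.values() if c % 2 == 1)
-- ===== Notes on version B (the rewrite author's own statement) =====
-- stated objective: alternative
-- what changed: Replaces the live toggling set with a parity computation: collect the elements seen since the last 'END' reset, tally their frequencies in a dict, and return the number of keys with odd count.
import Mathlib
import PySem

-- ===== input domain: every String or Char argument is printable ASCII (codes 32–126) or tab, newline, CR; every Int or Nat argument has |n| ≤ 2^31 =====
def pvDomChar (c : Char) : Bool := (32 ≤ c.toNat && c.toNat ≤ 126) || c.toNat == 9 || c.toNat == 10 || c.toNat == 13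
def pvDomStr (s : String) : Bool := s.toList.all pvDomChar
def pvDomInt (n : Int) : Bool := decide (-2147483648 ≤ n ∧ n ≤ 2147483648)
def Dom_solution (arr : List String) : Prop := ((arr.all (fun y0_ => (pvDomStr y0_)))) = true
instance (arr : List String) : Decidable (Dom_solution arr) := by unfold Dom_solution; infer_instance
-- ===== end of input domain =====

-- B replaces A's live toggling set with a parity computation over the elements since the last "END": alternative algorithm, same cost.

-- ===== PORT A =====
-- 'open_tab.remove(i)' runs only under 'i in open_tab', where it equals discard (no KeyError possible).
def solution (arr : List String) : Int :=
  let open_tab := arr.foldl (fun s i =>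
    if i == "END" then PySem.Set.empty
    else if PySem.Set.contains s i then PySem.Set.discard s i
    else PySem.Set.add s i) PySem.Set.empty
  (PySem.Set.len open_tab : Int)

-- ===== PORT B =====
def solution_alt (arr : List String) : Int :=
  let tail := arr.foldl (fun t x => if x == "END" then [] else t ++ [x]) ([] : List String)
  let counts := tail.foldl (fun d x => d.insert x (d.getD x 0 + 1)) (PySem.Dict.empty : PySem.Dict String Int)
  counts.values.foldl (fun acc c => if PySem.Int.mod c 2 == 1 then acc + 1 else acc) (0 : Int)

-- ===== PRECONDITION & SPEC =====
def Spec_solution (arr : List String) (out : Int) : Prop := out = solution_alt arr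
instance (arr : List String) (out : Int) : Decidable (Spec_solution arr out) := by unfold Spec_solution; infer_instance

-- ===== CLAIM (what is proved, stated in full; the proofs are below) =====
def Claim_equal_solution : Prop := ∀ (arr : List String), Dom_solution arr → Spec_solution arr (solution arr)

-- ===== LEMMAS AND PROOFS =====

-- the toggle step of A and the toggle of a whole list
def togStep (s : PySem.Set String) (i : String) : PySem.Set String :=
  if PySem.Set.contains s i then PySem.Set.discard s i else PySem.Set.add s i

def tog (t : List String) : PySem.Set String := t.foldl togStep PySem.Set.empty

lemma tog_append_singleton (t : List String) (x : String) :
    tog (t ++ [x]) = togStep (tog t) x := by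
  simp [tog, List.foldl_append]

lemma nodup_tog (t : List String) : (tog t).Nodup := by
  induction t using List.reverseRecOn with
  | nil => simp [tog, PySem.Set.empty]
  | append_singleton t x ih =>
    rw [tog_append_singleton]
    unfold togStep
    split
    · exact PySem.Set.nodup_discard _ _ ih
    · exact PySem.Set.nodup_add _ _ ih

lemma mem_tog (t : List String) (y : String) :
    y ∈ tog t ↔ (t.count y) % 2 = 1 := by
  induction t using List.reverseRecOn with
  | nil => simp [tog, PySem.Set.empty]
  | append_singleton t x ih =>
    rw [tog_append_singleton]
    unfold togStep
    by_cases hy : y = x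
    · subst hy
      rw [List.count_append]
      split
      · rename_i h
        rw [PySem.Set.contains_iff] at h
        rw [ih] at h
        simp [PySem.Set.mem_discard]
        omega
      · rename_i h
        rw [PySem.Set.contains_iff] at h
        rw [ih] at h
        simp [PySem.Set.mem_add]
        omega
    · have hy' : ¬x = y := fun h => hy h.symm
      have hc : (t ++ [x]).count y = t.count y := by
        simp [List.count_append, hy']
      rw [hc, ← ih]
      split
      · simp [PySem.Set.mem_discard, hy]
      · simp [PySem.Set.mem_add, hy]

-- A's fold over arr, started at tog t, is tog of B's tail fold started at t
lemma fold_eq_tog (arr : List String) : ∀ t : List String,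
    arr.foldl (fun s i =>
      if i == "END" then PySem.Set.empty
      else if PySem.Set.contains s i then PySem.Set.discard s i
      else PySem.Set.add s i) (tog t)
    = tog (arr.foldl (fun t x => if x == "END" then [] else t ++ [x]) t) := by
  induction arr with
  | nil => intro t; rfl
  | cons x rest ih =>
    intro t
    by_cases hx : x = "END"
    · simp only [List.foldl_cons, hx]
      simpa [tog] using ih []
    · simp only [List.foldl_cons, beq_iff_eq, hx, if_false]
      have hs : (if PySem.Set.contains (tog t) x then PySem.Set.discard (tog t) x
          else PySem.Set.add (tog t) x) = togStep (tog t) x := rfl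
      rw [hs, ← tog_append_singleton]
      simpa using ih (t ++ [x])
    
lemma tog_length (t : List String) :
    (tog t).length = ((PySem.Set.ofList t).filter (fun k => (t.count k) % 2 == 1)).length := by
  have hperm : (tog t).Perm ((PySem.Set.ofList t).filter (fun k => (t.count k) % 2 == 1)) := by
    rw [List.perm_ext_iff_of_nodup (nodup_tog t) (List.Nodup.filter _ (PySem.Set.nodup_ofList t))]
    intro y
    rw [mem_tog, List.mem_filter]
    constructor
    · intro h
      refine ⟨?_, by simpa using h⟩
      rw [PySem.Set.mem_ofList]
      have : t.count y ≠ 0 := by omega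
      exact List.count_pos_iff.mp (Nat.pos_of_ne_zero this)
    · intro ⟨_, h⟩; simpa using h
  exact hperm.length_eq

-- ===== VERDICT (by name: the statement is the Claim_ definition above) =====
theorem solution_spec : Claim_equal_solution := by
  intro arr _
  unfold Spec_solution solution solution_alt
  have h1 := fold_eq_tog arr []
  simp only [tog, List.foldl_nil] at h1
  simp only [h1, PySem.Dict.foldl_insert_getD_add_one_eq_counter, PySem.List.foldl_if_add_one]
  set t := arr.foldl (fun t x => if x == "END" then [] else t ++ [x]) ([] : List String) with ht
  have hv : (PySem.Dict.counter t).values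
      = (PySem.Set.ofList t).map (fun k => ((t.count k : Nat) : Int)) := by
    have := PySem.Dict.items_counter (xs := t)
    simp [PySem.Dict.values, this]
  rw [hv, List.countP_map, zero_add]
  have hlen : List.foldl togStep PySem.Set.empty t = tog t := rfl
  rw [hlen]
  have hl : (PySem.Set.len (tog t)) = ((tog t).length : Int) := by
    simp [PySem.Set.len]
  have hc : (PySem.Set.ofList t).countP
      ((fun x => PySem.Int.mod x 2 == 1) ∘ fun k => ((t.count k : Nat) : Int))
      = (PySem.Set.ofList t).countP (fun k => (t.count k) % 2 == 1) := by
    apply List.countP_congr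
    intro k _
    simp only [Function.comp]
    have hm : PySem.Int.mod ((t.count k : Nat) : Int) 2 = (((t.count k) % 2 : Nat) : Int) := by
      exact_mod_cast PySem.Int.mod_natCast (t.count k) 2
    rw [hm, Bool.eq_iff_iff]
    simp only [beq_iff_eq, iff_true]
    omega
  rw [hl, tog_length t, ← List.countP_eq_length_filter, hc]
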